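-- pv_equiv track=rewrite | github.com/ImGeuntae/CodingTest | 프로그래머스/3/152995. 인사고과/인사고과.py | solution
-- ===== SOURCE A (Python) =====
-- def solution(scores):
--     w = sum(scores[0])
--     s = ans = 0
--     for i in sorted(scores, key=lambda x:(-x[0],x[1])):
--         if i[1] >= s:
--             s = i[1]
--             if sum(i) > w:
--                 ans += 1
--         elif i == scores[0]:
--             return -1
--     return ans+1
-- ===== SOURCE B (Python) =====
-- def solution(scores):
--     # Direct (sort-free) quadratic re-implementation: an employee is "beaten"
--     # when some colleague strictly exceeds them in both scores, or their second
--     # score falls below the baseline 0 (A's running max starts at 0).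
--     first = scores[0]
--
--     def beaten(q):
--         return q[1] < max([0] + [p[1] for p in scores if p[0] > q[0]])
--
--     if beaten(first):
--         return -1
--     w = sum(first)
--     return 1 + sum(1 for q in scores if not beaten(q) and sum(q) > w)
-- ===== Notes on version B (the rewrite author's own statement) =====
-- stated objective: alternative
-- what changed: Replaces A's sort by (-first,second) with early-return running-max scan by a sort-free direct definition: each employee is tested for a strictly-dominating colleague by a per-employee max over colleagues with a larger first score (baseline 0, matching A's zero-initialised running max), then the qualifying employees are counted in one comprehension.
import Mathlib
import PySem

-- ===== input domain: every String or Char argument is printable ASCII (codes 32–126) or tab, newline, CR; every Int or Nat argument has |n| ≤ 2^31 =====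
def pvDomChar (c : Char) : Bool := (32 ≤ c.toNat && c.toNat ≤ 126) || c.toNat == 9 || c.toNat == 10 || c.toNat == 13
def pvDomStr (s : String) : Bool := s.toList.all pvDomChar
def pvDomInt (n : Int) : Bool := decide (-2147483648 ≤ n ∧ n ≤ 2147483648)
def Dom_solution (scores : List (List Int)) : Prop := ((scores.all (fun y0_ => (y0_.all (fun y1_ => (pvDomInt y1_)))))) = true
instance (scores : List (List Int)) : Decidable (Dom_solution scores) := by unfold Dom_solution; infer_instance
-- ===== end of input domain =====

-- B replaces A's sort + running-max early-return scan by a sort-free quadratic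
-- per-employee domination test (alternative decomposition, not faster).


-- ===== PORT A =====
-- sorted(scores, key=lambda x: (-x[0], x[1])) — Python's tuple key, ported as a lexicographic pair
def keyA (x : List Int) : Int ×ₗ Int := toLex (-(PySem.List.pyGetD x 0 0), PySem.List.pyGetD x 1 0)

-- the for-loop with state s, ans and the two early-return branches
def loopA (first : List Int) (w : Int) : List (List Int) → Int → Int → Int
  | [], _, ans => ans + 1
  | i :: rest, s, ans =>
    if PySem.List.pyGetD i 1 0 ≥ s then
      loopA first w rest (PySem.List.pyGetD i 1 0) (if i.sum > w then ans + 1 else ans)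
    else if i = first then -1
    else loopA first w rest s ans

def solution (scores : List (List Int)) : Int :=
  let first := (PySem.List.pyGet? scores 0).getD []
  let w := first.sum
  loopA first w (PySem.List.sorted scores keyA false) 0 0

-- ===== PORT B =====
-- beaten(q): q[1] < max([0] + [p[1] for p in scores if p[0] > q[0]])
-- (Python's max of the 0-prepended list is exactly the left fold of max from 0)
def beatenB (scores : List (List Int)) (q : List Int) : Bool :=
  PySem.List.pyGetD q 1 0 <
    ((scores.filter (fun p => PySem.List.pyGetD p 0 0 > PySem.List.pyGetD q 0 0)).map
      (fun p => PySem.List.pyGetD p 1 0)).foldl max 0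

def solution_alt (scores : List (List Int)) : Int :=
  let first := (PySem.List.pyGet? scores 0).getD []
  if beatenB scores first then -1
  else
    let w := first.sum
    1 + ((scores.filter (fun q => !beatenB scores q && decide (q.sum > w))).length : Int)

-- ===== PRECONDITION & SPEC =====
-- Pre_ excludes exactly the inputs on which Python A raises (IndexError):
-- the empty list (scores[0]) and any row of length < 2 (x[1] in the sort key).
def Pre_solution (scores : List (List Int)) : Prop :=
  scores ≠ [] ∧ ∀ r ∈ scores, 2 ≤ r.length
instance (scores : List (List Int)) : Decidable (Pre_solution scores) := by
  unfold Pre_solution; infer_instance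

def pvWitness_solution : List (List Int) := [[2, 2], [1, 4], [3, 2], [3, 2]]

def Spec_solution (scores : List (List Int)) (out : Int) : Prop := out = solution_alt scores
instance (scores : List (List Int)) (out : Int) : Decidable (Spec_solution scores out) := by unfold Spec_solution; infer_instance

-- ===== CLAIM (what is proved, stated in full; the proofs are below) =====
def Claim_equal_solution : Prop := ∀ (scores : List (List Int)), Dom_solution scores → Pre_solution scores → Spec_solution scores (solution scores)

-- ===== LEMMAS AND PROOFS =====

-- abbreviations used only by the proofs
def sndD (x : List Int) : Int := PySem.List.pyGetD x 1 0
def fstD (x : List Int) : Int := PySem.List.pyGetD x 0 0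
def maxSec (P : List (List Int)) : Int := (P.map sndD).foldl max 0

-- characterisation of B's domination test
lemma beatenB_iff (scores : List (List Int)) (q : List Int) :
    beatenB scores q = true ↔
      (sndD q < 0 ∨ ∃ p ∈ scores, fstD q < fstD p ∧ sndD q < sndD p) := by
  unfold beatenB
  rw [decide_eq_true_iff]
  constructor
  · intro hlt
    rcases PySem.List.foldl_max_mem
        ((scores.filter (fun p => PySem.List.pyGetD p 0 0 > PySem.List.pyGetD q 0 0)).map
          (fun p => PySem.List.pyGetD p 1 0)) 0 with h0 | hmem
    · rw [h0] at hlt; exact Or.inl hlt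
    · obtain ⟨p, hp, hps⟩ := List.mem_map.mp hmem
      obtain ⟨hpmem, hpf⟩ := List.mem_filter.mp hp
      refine Or.inr ⟨p, hpmem, ?_, ?_⟩
      · have hlt' : PySem.List.pyGetD q 0 0 < PySem.List.pyGetD p 0 0 := by simpa using hpf
        unfold fstD; exact hlt'
      · rw [← hps] at hlt; exact hlt
  · intro h
    rcases h with h0 | ⟨p, hpmem, hpf, hps⟩
    · have := (PySem.List.le_foldl_max
        ((scores.filter (fun p => PySem.List.pyGetD p 0 0 > PySem.List.pyGetD q 0 0)).map
          (fun p => PySem.List.pyGetD p 1 0)) 0).1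
      unfold sndD at h0; omega
    · have hmem : PySem.List.pyGetD p 1 0 ∈
          ((scores.filter (fun p => PySem.List.pyGetD p 0 0 > PySem.List.pyGetD q 0 0)).map
            (fun p => PySem.List.pyGetD p 1 0)) := by
        refine List.mem_map_of_mem (List.mem_filter.mpr ⟨hpmem, ?_⟩)
        simp only [gt_iff_lt, decide_eq_true_iff]
        exact hpf
      have := (PySem.List.le_foldl_max
        ((scores.filter (fun p => PySem.List.pyGetD p 0 0 > PySem.List.pyGetD q 0 0)).map
          (fun p => PySem.List.pyGetD p 1 0)) 0).2 _ hmem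
      unfold sndD at hps; omega

-- beatenB only depends on the multiset of rows
lemma beatenB_perm {T scores : List (List Int)} (h : T.Perm scores) (q : List Int) :
    beatenB T q = beatenB scores q := by
  rw [Bool.eq_iff_iff, beatenB_iff, beatenB_iff]
  constructor <;> rintro (h0 | ⟨p, hp, h1, h2⟩)
  · exact Or.inl h0
  · exact Or.inr ⟨p, h.mem_iff.mp hp, h1, h2⟩
  · exact Or.inl h0
  · exact Or.inr ⟨p, h.mem_iff.mpr hp, h1, h2⟩

-- the key of a list row, in proof notation
lemma keyA_le_iff (a b : List Int) :
    keyA a ≤ keyA b ↔ (fstD b < fstD a ∨ (fstD a = fstD b ∧ sndD a ≤ sndD b)) := by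
  unfold keyA fstD sndD
  rw [Prod.Lex.le_iff]
  simp only [ofLex_toLex]
  omega

lemma maxSec_append (P : List (List Int)) (i : List Int) :
    maxSec (P ++ [i]) = max (maxSec P) (sndD i) := by
  unfold maxSec
  rw [List.map_append, List.foldl_append]
  rfl

lemma maxSec_nonneg (P : List (List Int)) : 0 ≤ maxSec P :=
  (PySem.List.le_foldl_max _ _).1

lemma maxSec_ub (P : List (List Int)) (p : List Int) (hp : p ∈ P) : sndD p ≤ maxSec P :=
  (PySem.List.le_foldl_max _ _).2 _ (List.mem_map_of_mem hp)

-- on the sorted list T = P ++ i :: rest, "i[1] < s" is exactly B's domination test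
lemma cond_iff (T P rest : List (List Int)) (i : List Int)
    (hT : T.Pairwise (fun a b => keyA a ≤ keyA b)) (hPL : T = P ++ i :: rest) :
    sndD i < maxSec P ↔ beatenB T i = true := by
  have hsplit := hT
  rw [hPL, List.pairwise_append] at hsplit
  obtain ⟨-, hRest, hCross⟩ := hsplit
  have hPle : ∀ p ∈ P, keyA p ≤ keyA i := fun p hp => hCross p hp i (by simp)
  have hiLe : ∀ p ∈ rest, keyA i ≤ keyA p := (List.pairwise_cons.mp hRest).1
  rw [beatenB_iff, hPL]
  constructor
  · intro hlt
    rcases PySem.List.foldl_max_mem (P.map sndD) 0 with h0 | hmem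
    · left; unfold maxSec at hlt; rw [h0] at hlt; exact hlt
    · obtain ⟨p, hp, hps⟩ := List.mem_map.mp hmem
      have hle := (keyA_le_iff p i).mp (hPle p hp)
      have hlt' : sndD i < sndD p := by unfold maxSec at hlt; omega
      rcases hle with h | ⟨h1, h2⟩
      · exact Or.inr ⟨p, List.mem_append_left _ hp, h, hlt'⟩
      · omega
  · rintro (h0 | ⟨p, hpmem, h1, h2⟩)
    · have := maxSec_nonneg P; omega
    · rcases List.mem_append.mp hpmem with hp | hp
      · have := maxSec_ub P p hp; omega
      · rcases List.mem_cons.mp hp with rfl | hp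
        · omega
        · have := (keyA_le_iff i p).mp (hiLe p hp); omega

-- the loop of A, relative to the full sorted list T = P ++ L
lemma loopA_eq (first : List Int) (w : Int) (T : List (List Int))
    (hT : T.Pairwise (fun a b => keyA a ≤ keyA b)) :
    ∀ (L P : List (List Int)) (ans : Int), T = P ++ L →
      loopA first w L (maxSec P) ans =
        if beatenB T first = true ∧ first ∈ L then -1
        else ans + 1 + ((L.filter (fun q => !beatenB T q && decide (q.sum > w))).length : Int) := by
  intro L
  induction L with
  | nil => intro P ans _; simp [loopA]
  | cons i rest ih =>
    intro P ans hPL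
    have hcond := cond_iff T P rest i hT hPL
    have hPL' : T = (P ++ [i]) ++ rest := by simpa using hPL
    by_cases hbi : beatenB T i = true
    · -- i is beaten: i[1] < s
      have hlt : sndD i < maxSec P := hcond.mpr hbi
      have hstep : loopA first w (i :: rest) (maxSec P) ans =
          if i = first then -1 else loopA first w rest (maxSec P) ans := by
        simp only [loopA]
        rw [if_neg (by unfold sndD at hlt; omega)]
      rw [hstep]
      by_cases hif : i = first
      · subst hif
        rw [if_pos rfl, if_pos ⟨hbi, by simp⟩]
      · rw [if_neg hif]
        have hms : maxSec (P ++ [i]) = maxSec P := by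
          rw [maxSec_append]; omega
        have := ih (P ++ [i]) ans hPL'
        rw [hms] at this
        rw [this]
        have hfilter : (List.filter (fun q => !beatenB T q && decide (q.sum > w)) (i :: rest))
            = List.filter (fun q => !beatenB T q && decide (q.sum > w)) rest := by
          rw [List.filter_cons_of_neg (by simp [hbi])]
        have hmem : first ∈ i :: rest ↔ first ∈ rest := by
          constructor
          · intro h
            rcases List.mem_cons.mp h with h | h
            · exact absurd h.symm hif
            · exact h
          · exact List.mem_cons_of_mem i
        rw [hfilter]
        by_cases hb1 : beatenB T first = true ∧ first ∈ rest
        · rw [if_pos hb1, if_pos ⟨hb1.1, hmem.mpr hb1.2⟩]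
        · rw [if_neg hb1, if_neg (by rw [hmem]; exact hb1)]
    · -- i is not beaten: i[1] >= s
      have hge : maxSec P ≤ sndD i := not_lt.mp (fun h => hbi (hcond.mp h))
      have hstep : loopA first w (i :: rest) (maxSec P) ans =
          loopA first w rest (sndD i) (if i.sum > w then ans + 1 else ans) := by
        simp only [loopA]
        rw [if_pos (by unfold sndD at hge; omega)]
        rfl
      rw [hstep]
      have hms : maxSec (P ++ [i]) = sndD i := by
        rw [maxSec_append]; omega
      have := ih (P ++ [i]) (if i.sum > w then ans + 1 else ans) hPL'
      rw [hms] at this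
      rw [this]
      have hine : first ∈ i :: rest → beatenB T first = true → first ∈ rest := by
        intro hm hb
        rcases List.mem_cons.mp hm with rfl | h
        · exact absurd hb hbi
        · exact h
      have hfilter : ((List.filter (fun q => !beatenB T q && decide (q.sum > w)) (i :: rest)).length : Int)
          = (if i.sum > w then 1 else 0) + ((List.filter (fun q => !beatenB T q && decide (q.sum > w)) rest).length : Int) := by
        by_cases hsum : i.sum > w
        · rw [List.filter_cons_of_pos (by simp [hbi, hsum])]
          simp [hsum]
          ring
        · rw [List.filter_cons_of_neg (by simp [hbi, hsum])]
          simp [hsum]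
      by_cases hb1 : beatenB T first = true ∧ first ∈ rest
      · rw [if_pos hb1, if_pos ⟨hb1.1, List.mem_cons_of_mem i hb1.2⟩]
      · have hb2 : ¬ (beatenB T first = true ∧ first ∈ i :: rest) := by
          rintro ⟨hb, hm⟩
          exact hb1 ⟨hb, hine hm hb⟩
        rw [if_neg hb1, if_neg hb2, hfilter]
        by_cases hsum : i.sum > w
        · simp [hsum]; ring
        · simp [hsum]

-- ===== VERDICT (by name: the statement is the Claim_ definition above) =====
theorem solution_spec : Claim_equal_solution := by
  unfold Claim_equal_solution
  intro scores _ hPre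
  obtain ⟨hne, -⟩ := hPre
  obtain ⟨a, as, rfl⟩ := List.exists_cons_of_ne_nil hne
  unfold Spec_solution solution solution_alt
  simp only [PySem.List.pyGet?_zero_cons, Option.getD_some]
  set T := PySem.List.sorted (a :: as) keyA false with hTdef
  have hperm : T.Perm (a :: as) := PySem.List.sorted_perm _ _ _
  have hpw : T.Pairwise (fun x y => keyA x ≤ keyA y) := PySem.List.sorted_pairwise _ _
  have hmemT : a ∈ T := hperm.mem_iff.mpr (by simp)
  have h0 : maxSec ([] : List (List Int)) = 0 := rfl
  have hmain := loopA_eq a (a.sum) T hpw T [] 0 (by simp)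
  rw [h0] at hmain
  rw [hmain]
  have hbeq : beatenB T a = beatenB (a :: as) a := beatenB_perm hperm a
  have hcount : ((T.filter (fun q => !beatenB T q && decide (q.sum > a.sum))).length : Int)
      = (((a :: as).filter (fun q => !beatenB (a :: as) q && decide (q.sum > a.sum))).length : Int) := by
    rw [List.filter_congr (fun q _ => by rw [beatenB_perm hperm q])]
    rw [(hperm.filter _).length_eq]
  by_cases hb : beatenB (a :: as) a = true
  · rw [if_pos ⟨by rw [hbeq]; exact hb, hmemT⟩, if_pos hb]
  · rw [if_neg (by rw [hbeq]; exact fun h => hb h.1), if_neg hb, hcount]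
    ring
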